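-- pv_equiv track=rewrite | github.com/RasmusLesebergPXL/PBTIN | Jaar_1/IT Essentials/IT-essentials-oefeningen/7_lists/slide23 - Copy.py | heart_rate_difference
-- ===== SOURCE A (Python) =====
-- def get_number_of_participants(heartbeats):
--     return len(heartbeats[0])
--
-- def get_number_of_tests(heartbeats):
--     return len(heartbeats)
--
-- def heart_rate_difference(heartbeats):
--     results = []
--     for participant in range(get_number_of_participants(heartbeats)):
--         lowest = heartbeats[0][participant]
--         highest = heartbeats[0][participant]
--         for test in range(1, get_number_of_tests(heartbeats)):
--             if heartbeats[test][participant] < lowest: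
--                 lowest = heartbeats[test][participant]
--             if heartbeats[test][participant] > highest:
--                 highest = heartbeats[test][participant]
--         results.append(highest - lowest)
--     return results
-- ===== SOURCE B (Python) =====
-- def heart_rate_difference(heartbeats):
--     lows = list(heartbeats[0])
--     highs = list(heartbeats[0])
--     for row in heartbeats[1:]:
--         lows = [min(l, v) for l, v in zip(lows, row)]
--         highs = [max(h, v) for h, v in zip(highs, row)]
--     return [h - l for h, l in zip(highs, lows)]
-- ===== Notes on version B (the rewrite author's own statement) =====
-- stated objective: alternative
-- what changed: Replaced A's column-major nested loops (one per-participant scan with scalar running min/max) by a single row-major fold that carries whole vectors of running lows/highs updated by zipping each row in, then subtracts the vectors pointwise.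
import Mathlib
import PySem

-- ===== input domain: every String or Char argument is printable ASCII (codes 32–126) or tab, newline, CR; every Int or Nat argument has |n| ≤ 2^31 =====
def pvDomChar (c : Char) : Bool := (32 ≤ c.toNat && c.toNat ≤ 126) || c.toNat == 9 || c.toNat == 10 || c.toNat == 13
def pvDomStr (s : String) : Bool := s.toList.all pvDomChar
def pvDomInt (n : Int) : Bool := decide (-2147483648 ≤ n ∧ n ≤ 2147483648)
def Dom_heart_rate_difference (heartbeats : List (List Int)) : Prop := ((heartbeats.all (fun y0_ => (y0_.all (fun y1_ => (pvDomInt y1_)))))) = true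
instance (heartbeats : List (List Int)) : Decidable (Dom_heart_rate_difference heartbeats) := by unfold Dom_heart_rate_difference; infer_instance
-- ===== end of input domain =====

-- B replaces A's column-major nested loops (one index-addressed min/max scan per
-- participant) by a single row-major fold that carries whole vectors of running
-- lows/highs, updated by zipping each row in (objective: alternative decomposition).

-- ===== PORT A =====
def heart_rate_difference (heartbeats : List (List Int)) : List Int :=
  (PySem.List.pyRange 0 ((PySem.List.pyGetD heartbeats 0 []).length : Int) 1).foldl
    (fun results participant =>
      let first := PySem.List.pyGetD (PySem.List.pyGetD heartbeats 0 []) participant 0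
      let lh := (PySem.List.pyRange 1 ((heartbeats.length : Int)) 1).foldl
        (fun (lh : Int × Int) test =>
          let v := PySem.List.pyGetD (PySem.List.pyGetD heartbeats test []) participant 0
          (if v < lh.1 then v else lh.1, if v > lh.2 then v else lh.2))
        (first, first)
      results ++ [lh.2 - lh.1]) []

-- ===== PORT B =====
-- lows/highs start as copies of row 0; each later row is zipped in, pointwise
-- min/max; the answer is the pointwise difference highs - lows.
def heart_rate_difference_alt (heartbeats : List (List Int)) : List Int :=
  match heartbeats with
  | [] => []   -- unreachable under Pre_: Python raises IndexError on heartbeats[0]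
  | r0 :: rest =>
    let lh := rest.foldl
      (fun (lh : List Int × List Int) row =>
        (List.zipWith (fun l v => min l v) lh.1 row,
         List.zipWith (fun h v => max h v) lh.2 row))
      (r0, r0)
    List.zipWith (fun h l => h - l) lh.2 lh.1

-- ===== PRECONDITION & SPEC =====
-- Pre_ excludes exactly the inputs on which A raises IndexError: the empty list
-- (heartbeats[0]) and matrices with a row shorter than row 0.
def Pre_heart_rate_difference (heartbeats : List (List Int)) : Prop :=
  heartbeats ≠ [] ∧ ∀ r ∈ heartbeats, (heartbeats.headD []).length ≤ r.length
instance (heartbeats : List (List Int)) : Decidable (Pre_heart_rate_difference heartbeats) := by unfold Pre_heart_rate_difference; infer_instance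

def pvWitness_heart_rate_difference : List (List Int) := [[60, 80], [70, 75], [65, 90]]

def Spec_heart_rate_difference (heartbeats : List (List Int)) (out : List Int) : Prop := out = heart_rate_difference_alt heartbeats
instance (heartbeats : List (List Int)) (out : List Int) : Decidable (Spec_heart_rate_difference heartbeats out) := by unfold Spec_heart_rate_difference; infer_instance

-- ===== CLAIM (what is proved, stated in full; the proofs are below) =====
def Claim_equal_heart_rate_difference : Prop := ∀ (heartbeats : List (List Int)), Dom_heart_rate_difference heartbeats → Pre_heart_rate_difference heartbeats → Spec_heart_rate_difference heartbeats (heart_rate_difference heartbeats)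

-- ===== LEMMAS AND PROOFS =====

-- the pair fold of running min/max (A's inner loop) splits into two folds
theorem pv_pair_fold (t : List Int) (a b : Int) :
    t.foldl (fun (lh : Int × Int) v =>
      (if v < lh.1 then v else lh.1, if v > lh.2 then v else lh.2)) (a, b)
    = (t.foldl min a, t.foldl max b) := by
  induction t generalizing a b with
  | nil => rfl
  | cons v t ih =>
    have h1 : (if v < a then v else a) = min a v := by rw [min_def]; split_ifs <;> omega
    have h2 : (if v > b then v else b) = max b v := by rw [max_def]; split_ifs <;> omega
    simp only [List.foldl_cons, h1, h2, ih]

-- A = map over the participant range of (column max - column min)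
theorem pv_A_eq (r0 : List Int) (rs : List (List Int)) :
    heart_rate_difference (r0 :: rs)
      = (List.range r0.length).map (fun p =>
          (rs.map (fun r => r.getD p 0)).foldl max (r0.getD p 0)
          - (rs.map (fun r => r.getD p 0)).foldl min (r0.getD p 0)) := by
  unfold heart_rate_difference
  rw [PySem.List.foldl_append_singleton_eq_map]
  simp only [PySem.List.pyGetD_zero_cons, List.nil_append]
  rw [PySem.List.pyRange_zero_natCast, List.map_map]
  apply List.map_congr_left
  intro p _
  simp only [Function.comp]
  have hinner :=
    PySem.List.foldl_pyRange_pyGetD' (a := 1) (r0 :: rs) ([] : List Int)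
      (fun (lh : Int × Int) (r : List Int) =>
        (if PySem.List.pyGetD r (p : Int) 0 < lh.1 then PySem.List.pyGetD r (p : Int) 0 else lh.1,
         if PySem.List.pyGetD r (p : Int) 0 > lh.2 then PySem.List.pyGetD r (p : Int) 0 else lh.2))
      (PySem.List.pyGetD r0 (p : Int) 0, PySem.List.pyGetD r0 (p : Int) 0) (by omega)
  simp only [] at hinner
  rw [hinner]
  simp only [show ((1 : Int)).toNat = 1 from rfl, List.drop_succ_cons, List.drop_zero,
    PySem.List.pyGetD_natCast]
  rw [show
      (rs.foldl (fun (lh : Int × Int) (r : List Int) =>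
        (if r.getD p 0 < lh.1 then r.getD p 0 else lh.1,
         if r.getD p 0 > lh.2 then r.getD p 0 else lh.2)) (r0.getD p 0, r0.getD p 0))
      = ((rs.map (fun r => r.getD p 0)).foldl (fun (lh : Int × Int) v =>
          (if v < lh.1 then v else lh.1, if v > lh.2 then v else lh.2))
          (r0.getD p 0, r0.getD p 0)) from by rw [List.foldl_map]]
  rw [pv_pair_fold]

-- B's vector pair fold splits into two vector folds
theorem pv_vec_pair_fold (rows : List (List Int)) (ls hs : List Int) :
    rows.foldl
      (fun (lh : List Int × List Int) row =>
        (List.zipWith (fun l v => min l v) lh.1 row,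
         List.zipWith (fun h v => max h v) lh.2 row)) (ls, hs)
    = (rows.foldl (fun ls row => List.zipWith (fun l v => min l v) ls row) ls,
       rows.foldl (fun hs row => List.zipWith (fun h v => max h v) hs row) hs) := by
  induction rows generalizing ls hs with
  | nil => rfl
  | cons r rows ih => simp only [List.foldl_cons, ih]

-- a vector fold of zipWith f keeps its length and acts pointwise
theorem pv_foldl_zipWith (f : Int → Int → Int) (rows : List (List Int)) :
    ∀ (ls : List Int), (∀ r ∈ rows, ls.length ≤ r.length) →
    (rows.foldl (fun ls row => List.zipWith f ls row) ls).length = ls.length ∧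
    ∀ p : Nat, p < ls.length →
      (rows.foldl (fun ls row => List.zipWith f ls row) ls).getD p 0
        = (rows.map (fun r => r.getD p 0)).foldl f (ls.getD p 0) := by
  induction rows with
  | nil => intro ls _; exact ⟨rfl, fun _ _ => rfl⟩
  | cons r rows ih =>
    intro ls hall
    have hr : ls.length ≤ r.length := hall r (List.mem_cons_self ..)
    have hlen : (List.zipWith f ls r).length = ls.length := by
      simp [List.length_zipWith]; omega
    have hall' : ∀ r' ∈ rows, (List.zipWith f ls r).length ≤ r'.length := by
      intro r' hr'; rw [hlen]; exact hall r' (List.mem_cons_of_mem _ hr')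
    obtain ⟨ih1, ih2⟩ := ih (List.zipWith f ls r) hall'
    refine ⟨by simpa [hlen] using ih1, ?_⟩
    intro p hp
    rw [List.foldl_cons, ih2 p (by omega)]
    simp only [List.map_cons, List.foldl_cons]
    congr 1
    rw [List.getD_eq_getElem _ _ (by omega), List.getD_eq_getElem _ _ hp,
      List.getD_eq_getElem _ _ (by omega), List.getElem_zipWith]

-- ===== VERDICT (by name: the statement is the Claim_ definition above) =====
theorem heart_rate_difference_spec : Claim_equal_heart_rate_difference := by
  intro hb _ hpre
  obtain ⟨hne, hall⟩ := hpre
  match hb, hne with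
  | r0 :: rs, _ =>
    simp only [List.headD_cons] at hall
    have hall' : ∀ r ∈ rs, r0.length ≤ r.length := fun r hr =>
      hall r (List.mem_cons_of_mem _ hr)
    unfold Spec_heart_rate_difference
    rw [pv_A_eq r0 rs]
    have hB : heart_rate_difference_alt (r0 :: rs)
        = (fun lh : List Int × List Int => List.zipWith (fun h l => h - l) lh.2 lh.1)
            (rs.foldl
              (fun (lh : List Int × List Int) row =>
                (List.zipWith (fun l v => min l v) lh.1 row,
                 List.zipWith (fun h v => max h v) lh.2 row)) (r0, r0)) := rfl
    rw [hB, pv_vec_pair_fold]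
    obtain ⟨hlmin, hgmin⟩ := pv_foldl_zipWith (fun l v => min l v) rs r0 hall'
    obtain ⟨hlmax, hgmax⟩ := pv_foldl_zipWith (fun h v => max h v) rs r0 hall'
    apply List.ext_getElem
    · simp [List.length_zipWith, hlmin, hlmax]
    · intro p hp1 hp2
      simp only [List.length_map, List.length_range] at hp1
      simp only [List.getElem_map, List.getElem_range, List.getElem_zipWith]
      rw [← List.getD_eq_getElem _ 0 (by omega), ← List.getD_eq_getElem _ 0 (by omega),
        hgmin p hp1, hgmax p hp1]
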